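-- pv_equiv track=rewrite | github.com/FAnzTvDev/ATLAS_CONTROL_SYSTEM | tools/pre_gen_enforcer.py | _check_prompt_health
-- ===== SOURCE A (Python) =====
-- from typing import Dict, List, Optional, Tuple
--
-- def _check_prompt_health(shots: List[Dict]) -> Tuple[List[str], List[Dict]]:
--     """CHECK 7: No corrupted/repeated prompts (T2-CPC-9)."""
--     issues = []
--     fixes = []
--     for shot in shots:
--         sid = shot.get("shot_id", "")
--         for field in ["nano_prompt", "ltx_motion_prompt"]:
--             text = shot.get(field, "")
--             if not text or len(text) < 60:
--                 continue
--             # Check for 30-char substring appearing 3+ times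
--             for i in range(len(text) - 30):
--                 substr = text[i:i+30]
--                 if text.count(substr) >= 3:
--                     issues.append(f"BLOCKING: {sid} field '{field}' has CORRUPTED repeated text")
--                     break
--     return issues, fixes
-- ===== SOURCE B (Python) =====
-- from typing import Dict, List, Tuple
--
-- FIELDS = ["nano_prompt", "ltx_motion_prompt"]
--
-- def _has_triple_repeat(text: str) -> bool:
--     # Group the start positions of every 30-gram by gram,
--     # then count greedy non-overlapping occurrences per gram.
--     groups = {}
--     for i in range(len(text) - 29):
--         groups.setdefault(text[i:i+30], []).append(i)
--     for ps in groups.values():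
--         count = 0
--         bound = 0
--         for p in ps:
--             if p >= bound:
--                 count += 1
--                 bound = p + 30
--         if count >= 3:
--             return True
--     return False
--
-- def _issues_of(shot: Dict) -> List[str]:
--     sid = shot.get("shot_id", "")
--     return [
--         f"BLOCKING: {sid} field '{f}' has CORRUPTED repeated text"
--         for f in FIELDS
--         if len(shot.get(f, "")) >= 60 and _has_triple_repeat(shot.get(f, ""))
--     ]
--
-- def _check_prompt_health(shots: List[Dict]) -> Tuple[List[str], List[Dict]]:
--     return [msg for shot in shots for msg in _issues_of(shot)], []
-- ===== Notes on version B (the rewrite author's own statement) =====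
-- stated objective: alternative
-- what changed: B replaces A's per-index full-text text.count rescans by one pass grouping 30-gram start positions in a dict plus a greedy non-overlapping count per position list, and replaces A's nested accumulator loops by a flat comprehension mapping each shot to its issue messages.
import Mathlib
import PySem

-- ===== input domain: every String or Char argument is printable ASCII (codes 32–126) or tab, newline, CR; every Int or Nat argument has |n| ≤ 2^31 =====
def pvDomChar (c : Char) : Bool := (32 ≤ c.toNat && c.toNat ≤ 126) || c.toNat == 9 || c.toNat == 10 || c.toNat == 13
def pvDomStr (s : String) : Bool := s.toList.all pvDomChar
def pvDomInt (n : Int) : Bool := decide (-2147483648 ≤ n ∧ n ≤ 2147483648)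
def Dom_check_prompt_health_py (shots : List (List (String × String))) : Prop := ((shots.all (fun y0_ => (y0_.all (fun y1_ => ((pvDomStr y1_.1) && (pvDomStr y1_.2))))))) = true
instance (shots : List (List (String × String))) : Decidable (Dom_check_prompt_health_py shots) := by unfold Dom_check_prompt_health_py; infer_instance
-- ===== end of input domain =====

-- B replaces A's per-index full-text text.count rescans by one dict pass grouping the
-- 30-gram start positions per gram with a greedy non-overlapping count per list, and
-- replaces A's nested accumulator loops by a flat comprehension per shot.

-- dict.get(k, dflt) on the association-list encoding (first match), used by both ports
def pyDictGetD (d : List (String × String)) (k dflt : String) : String :=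
  match d.find? (fun p => p.1 == k) with
  | some p => p.2
  | none => dflt

-- ===== PORT A =====
-- 'for i in range(len(text)-30): if text.count(text[i:i+30]) >= 3: …; break'
def innerScanA (text : String) (idxs : List Int) : Bool :=
  match idxs with
  | [] => false
  | i :: rest =>
    if 3 ≤ PySem.Str.count text (PySem.Str.slice text (some i) (some (i + 30))) then true
    else innerScanA text rest

def fieldLoopA (sid : String) (shot : List (String × String)) (fields : List String)
    (issues : List String) : List String :=
  match fields with
  | [] => issues
  | field :: rest =>
    let text := pyDictGetD shot field ""
    if text == "" || PySem.Str.len text < 60 then fieldLoopA sid shot rest issues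
    else if innerScanA text (PySem.List.pyRange 0 (PySem.Str.len text - 30)) then
      fieldLoopA sid shot rest
        (issues ++ ["BLOCKING: " ++ sid ++ " field '" ++ field ++ "' has CORRUPTED repeated text"])
    else fieldLoopA sid shot rest issues

def shotLoopA (shots : List (List (String × String))) (issues : List String) : List String :=
  match shots with
  | [] => issues
  | shot :: rest =>
    shotLoopA rest (fieldLoopA (pyDictGetD shot "shot_id" "") shot ["nano_prompt", "ltx_motion_prompt"] issues)

def check_prompt_health_py (shots : List (List (String × String))) :
    List String × (List (List (String × String))) :=
  (shotLoopA shots [], [])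

-- ===== PORT B =====
-- greedy non-overlapping occurrence counter over one gram's (ascending) position list
def repScan (ps : List Int) (c bound : Int) : Int :=
  match ps with
  | [] => c
  | p :: rest => if bound ≤ p then repScan rest (c + 1) (p + 30) else repScan rest c bound

def hasTripleRepeat (text : String) : Bool :=
  let pairs := (PySem.List.pyRange 0 (PySem.Str.len text - 29)).map
    (fun i => (PySem.Str.slice text (some i) (some (i + 30)), i))
  let groups := pairs.foldl (fun d p => d.modify p.1 [] (fun l => l ++ [p.2])) PySem.Dict.empty
  groups.values.any (fun ps => 3 ≤ repScan ps 0 0)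

-- '_issues_of': the comprehension over FIELDS for one shot
def issuesOf (shot : List (String × String)) : List String :=
  let sid := pyDictGetD shot "shot_id" ""
  (["nano_prompt", "ltx_motion_prompt"].filter (fun f =>
      decide ((60 : Int) ≤ PySem.Str.len (pyDictGetD shot f ""))
        && hasTripleRepeat (pyDictGetD shot f ""))).map
    (fun f => "BLOCKING: " ++ sid ++ " field '" ++ f ++ "' has CORRUPTED repeated text")

def check_prompt_health_py_alt (shots : List (List (String × String))) :
    List String × (List (List (String × String))) :=
  (shots.flatMap issuesOf, [])

-- ===== PRECONDITION & SPEC =====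
def Spec_check_prompt_health_py (shots : List (List (String × String))) (out : List String × (List (List (String × String)))) : Prop := out = check_prompt_health_py_alt shots
instance (shots : List (List (String × String))) (out : List String × (List (List (String × String)))) : Decidable (Spec_check_prompt_health_py shots out) := by unfold Spec_check_prompt_health_py; infer_instance

-- ===== CLAIM (what is proved, stated in full; the proofs are below) =====
def Claim_equal_check_prompt_health_py : Prop := ∀ (shots : List (List (String × String))), Dom_check_prompt_health_py shots → Spec_check_prompt_health_py shots (check_prompt_health_py shots)

-- ===== LEMMAS AND PROOFS =====

-- fuel-free version of Python's non-overlapping str.count scan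
def cnt (g : List Char) : List Char → Nat
  | [] => 0
  | h :: t => if g.isPrefixOf (h :: t) then cnt g (t.drop (g.length - 1)) + 1 else cnt g t
termination_by l => l.length
decreasing_by
  · simp only [List.length_drop, List.length_cons]; omega
  · simp

lemma count_go_eq_cnt (g : List Char) (hg : g ≠ []) :
    ∀ fuel (l : List Char) (acc : Nat), l.length ≤ fuel →
      PySem.Chars.count.go g fuel l acc = acc + cnt g l := by
  intro fuel
  induction fuel with
  | zero =>
    intro l acc hl
    have : l = [] := by cases l <;> simp_all
    subst this; simp [PySem.Chars.count.go, cnt]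
  | succ n ih =>
    intro l acc hl
    cases l with
    | nil => simp [PySem.Chars.count.go, cnt]
    | cons h t =>
      by_cases hp : g.isPrefixOf (h :: t)
      · have h1 : 1 ≤ g.length := by cases g <;> simp_all
        have hstep : PySem.Chars.count.go g (n+1) (h :: t) acc
            = PySem.Chars.count.go g n (List.drop g.length (h :: t)) (acc + 1) := by
          simp [PySem.Chars.count.go, hp]
        rw [hstep, ih _ _ (by simp at hl ⊢; omega)]
        have hdrop : List.drop g.length (h :: t) = t.drop (g.length - 1) := by
          cases g with
          | nil => simp_all
          | cons a b => simp
        rw [hdrop]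
        simp [cnt, hp]
        omega
      · have hstep : PySem.Chars.count.go g (n+1) (h :: t) acc
            = PySem.Chars.count.go g n t acc := by
          simp [PySem.Chars.count.go, hp]
        rw [hstep, ih _ _ (by simp at hl; omega)]
        simp [cnt, hp]

lemma count_eq_cnt (s g : List Char) (hg : g ≠ []) : PySem.Chars.count s g = cnt g s := by
  have h : g.isEmpty = false := by cases g <;> simp_all
  rw [PySem.Chars.count, if_neg (by simp [h])]
  simpa using count_go_eq_cnt g hg s.length s 0 le_rfl

-- backward shift of an occurrence under the cnt step 'drop (g.length - 1) of the tail'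
lemma drop_tail_shift (g : List Char) (h1 : 1 ≤ g.length) (h : Char) (t : List Char) :
    ∀ x, (t.drop (g.length - 1)).drop x = (h :: t).drop (g.length + x) := by
  intro x
  rw [List.drop_drop]
  have hx : g.length + x = (g.length - 1 + x) + 1 := by omega
  rw [hx, List.drop_succ_cons]

-- extraction of 1/2/3 pairwise non-overlapping occurrences from cnt
lemma cnt1_ex (g : List Char) :
    ∀ m : List Char, 1 ≤ cnt g m → ∃ p, g.IsPrefix (m.drop p) := by
  intro m
  induction m using cnt.induct g with
  | case1 => simp [cnt]
  | case2 h t hp ih =>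
    intro _
    exact ⟨0, by simpa using List.isPrefixOf_iff_prefix.mp hp⟩
  | case3 h t hp ih =>
    intro hc
    rw [cnt, if_neg hp] at hc
    obtain ⟨p, hpp⟩ := ih hc
    exact ⟨p + 1, by simpa using hpp⟩

lemma cnt2_ex (g : List Char) (hg : g ≠ []) :
    ∀ m : List Char, 2 ≤ cnt g m →
      ∃ p q, g.IsPrefix (m.drop p) ∧ g.IsPrefix (m.drop q) ∧ p + g.length ≤ q := by
  intro m
  have h1 : 1 ≤ g.length := by cases g <;> simp_all
  induction m using cnt.induct g with
  | case1 => simp [cnt]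
  | case2 h t hp ih =>
    intro hc
    rw [cnt, if_pos hp] at hc
    obtain ⟨p, hpp⟩ := cnt1_ex g (t.drop (g.length - 1)) (by omega)
    refine ⟨0, g.length + p, ?_, ?_, ?_⟩
    · simpa using List.isPrefixOf_iff_prefix.mp hp
    · rw [← drop_tail_shift g h1 h t p]; exact hpp
    · omega
  | case3 h t hp ih =>
    intro hc
    rw [cnt, if_neg hp] at hc
    obtain ⟨p, q, hpp, hqq, hle⟩ := ih hc
    exact ⟨p + 1, q + 1, by simpa using hpp, by simpa using hqq, by omega⟩

lemma cnt3_ex (g : List Char) (hg : g ≠ []) :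
    ∀ m : List Char, 3 ≤ cnt g m →
      ∃ p q r, g.IsPrefix (m.drop p) ∧ g.IsPrefix (m.drop q) ∧ g.IsPrefix (m.drop r) ∧
        p + g.length ≤ q ∧ q + g.length ≤ r := by
  intro m
  have h1 : 1 ≤ g.length := by cases g <;> simp_all
  induction m using cnt.induct g with
  | case1 => simp [cnt]
  | case2 h t hp ih =>
    intro hc
    rw [cnt, if_pos hp] at hc
    obtain ⟨p, q, hpp, hqq, hle⟩ := cnt2_ex g hg (t.drop (g.length - 1)) (by omega)
    refine ⟨0, g.length + p, g.length + q, ?_, ?_, ?_, ?_, ?_⟩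
    · simpa using List.isPrefixOf_iff_prefix.mp hp
    · rw [← drop_tail_shift g h1 h t p]; exact hpp
    · rw [← drop_tail_shift g h1 h t q]; exact hqq
    · omega
    · omega
  | case3 h t hp ih =>
    intro hc
    rw [cnt, if_neg hp] at hc
    obtain ⟨p, q, r, hpp, hqq, hrr, hle1, hle2⟩ := ih hc
    exact ⟨p + 1, q + 1, r + 1, by simpa using hpp, by simpa using hqq, by simpa using hrr,
      by omega, by omega⟩

-- the ascending list of all occurrence start positions from index j on
def occs (cs g : List Char) (j : Nat) : List Nat :=
  if j < cs.length then
    (if g.isPrefixOf (cs.drop j) then [j] else []) ++ occs cs g (j + 1)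
  else []
termination_by cs.length - j

lemma occs_eq_filter (cs g : List Char) :
    ∀ fuel j, cs.length - j ≤ fuel →
      occs cs g j = (List.range' j (cs.length - j)).filter (fun i => g.isPrefixOf (cs.drop i)) := by
  intro fuel
  induction fuel with
  | zero =>
    intro j h
    rw [occs, if_neg (by omega), show cs.length - j = 0 from by omega]
    rfl
  | succ m ih =>
    intro j h
    by_cases hj : j < cs.length
    · rw [occs, if_pos hj, ih (j + 1) (by omega),
        show cs.length - j = (cs.length - (j + 1)) + 1 from by omega, List.range'_succ,
        List.filter_cons]
      by_cases hp : g.isPrefixOf (cs.drop j) <;> simp [hp]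
    · rw [occs, if_neg hj, show cs.length - j = 0 from by omega]
      rfl

-- Nat twin of the port's repScan greedy loop
def natScan (ps : List Nat) (c bound : Nat) : Nat :=
  match ps with
  | [] => c
  | p :: rest => if bound ≤ p then natScan rest (c + 1) (p + 30) else natScan rest c bound

lemma repScan_map_cast (ps : List Nat) :
    ∀ c bound : Nat, repScan (ps.map (fun (k : Nat) => (k : Int))) (c : Int) (bound : Int)
      = ((natScan ps c bound : Nat) : Int) := by
  induction ps with
  | nil => intro c bound; simp [repScan, natScan]
  | cons p rest ih =>
    intro c bound
    rw [List.map_cons]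
    by_cases h : bound ≤ p
    · rw [repScan, natScan, if_pos (Nat.cast_le.mpr h), if_pos h]
      have h2 := ih (c + 1) (p + 30)
      push_cast at h2 ⊢
      exact h2
    · rw [repScan, natScan, if_neg (fun hc => h (Nat.cast_le.mp hc)), if_neg h]
      exact ih c bound

lemma natScan_skip (cs g : List Char) :
    ∀ j j' c b, j ≤ j' → j' ≤ b → natScan (occs cs g j) c b = natScan (occs cs g j') c b := by
  intro j j' c b hjj hjb
  induction hd : j' - j generalizing j with
  | zero =>
    have : j = j' := by omega
    subst this; rfl
  | succ k ih =>
    have hjlt : j < j' := by omega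
    by_cases hj : j < cs.length
    · rw [occs, if_pos hj]
      by_cases hp : g.isPrefixOf (cs.drop j)
      · rw [if_pos hp]
        have hstep : natScan (j :: occs cs g (j + 1)) c b = natScan (occs cs g (j + 1)) c b := by
          simp only [natScan]
          rw [if_neg (by omega)]
        rw [List.singleton_append, hstep]
        exact ih (j + 1) (by omega) (by omega)
      · rw [if_neg hp, List.nil_append]
        exact ih (j + 1) (by omega) (by omega)
    · rw [occs, if_neg hj, occs, if_neg (by omega)]

lemma natScan_occs (cs g : List Char) (hg : g.length = 30) :
    ∀ fuel j c b, cs.length - j ≤ fuel → b ≤ j →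
      natScan (occs cs g j) c b = c + cnt g (cs.drop j) := by
  intro fuel
  induction fuel with
  | zero =>
    intro j c b hf hb
    rw [occs, if_neg (by omega), List.drop_of_length_le (by omega)]
    simp [natScan, cnt]
  | succ n ih =>
    intro j c b hf hb
    by_cases hj : j < cs.length
    · obtain ⟨ch, rest, hd⟩ := List.exists_cons_of_ne_nil
        (show cs.drop j ≠ [] by simp [List.drop_eq_nil_iff]; omega)
      have hrest : rest = cs.drop (j + 1) := by
        have h1 : (cs.drop j).drop 1 = cs.drop (j + 1) := by rw [List.drop_drop]
        rw [hd] at h1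
        simpa using h1
      by_cases hp : g.isPrefixOf (cs.drop j)
      · rw [occs, if_pos hj, if_pos hp, List.singleton_append]
        have hstep : natScan (j :: occs cs g (j + 1)) c b
            = natScan (occs cs g (j + 1)) (c + 1) (j + 30) := by
          simp only [natScan]; rw [if_pos hb]
        rw [hstep, natScan_skip cs g (j + 1) (j + 30) (c + 1) (j + 30) (by omega) le_rfl,
          ih (j + 30) (c + 1) (j + 30) (by omega) le_rfl]
        have hp' : g.isPrefixOf (ch :: rest) = true := by rwa [← hd]
        have hdr : rest.drop (g.length - 1) = cs.drop (j + 30) := by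
          rw [hrest, List.drop_drop, hg, show j + 1 + (30 - 1) = j + 30 from by omega]
        have hcnt : cnt g (cs.drop j) = cnt g (cs.drop (j + 30)) + 1 := by
          rw [hd, cnt, if_pos hp', hdr]
        rw [hcnt]
        omega
      · rw [occs, if_pos hj, if_neg hp, List.nil_append, ih (j + 1) c b (by omega) (by omega)]
        have hp' : ¬ g.isPrefixOf (ch :: rest) = true := by rwa [← hd]
        have hcnt : cnt g (cs.drop j) = cnt g (cs.drop (j + 1)) := by
          rw [hd, cnt, if_neg hp', hrest]
        rw [hcnt]
    · rw [occs, if_neg hj, List.drop_of_length_le (by omega)]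
      simp [natScan, cnt]

-- the 30-gram of cs starting at k
def gram (cs : List Char) (k : Nat) : List Char := (cs.drop k).take 30

lemma gram_len (cs : List Char) (k : Nat) (hk : k + 30 ≤ cs.length) : (gram cs k).length = 30 := by
  simp [gram]; omega

lemma gram_ne_nil (cs : List Char) (k : Nat) (hk : k + 30 ≤ cs.length) : gram cs k ≠ [] := by
  intro h
  have := gram_len cs k hk
  rw [h] at this
  simp at this

lemma slice_toList (s : String) (k : Nat) :
    (PySem.Str.slice s (some (k : Int)) (some ((k : Int) + 30))).toList = gram s.toList k := by
  rw [PySem.Str.toList_slice, PySem.Chars.slice_eq_listSlice]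
  have h : ((k : Int) + 30) = ((k + 30 : Nat) : Int) := by push_cast; ring
  rw [h, PySem.List.slice_natCast]
  simp [gram]

-- A's inner loop is an existential over its index list
lemma innerScanA_iff (text : String) (idxs : List Int) :
    innerScanA text idxs = true ↔
      ∃ i ∈ idxs, 3 ≤ PySem.Str.count text (PySem.Str.slice text (some i) (some (i + 30))) := by
  induction idxs with
  | nil => simp [innerScanA]
  | cons i rest ih =>
    rw [innerScanA]
    by_cases h : 3 ≤ PySem.Str.count text (PySem.Str.slice text (some i) (some (i + 30)))
    · rw [if_pos h]
      constructor
      · intro _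
        exact ⟨i, List.mem_cons_self, h⟩
      · intro _
        rfl
    · rw [if_neg h, ih]
      constructor
      · rintro ⟨x, hx, hc⟩
        exact ⟨x, List.mem_cons_of_mem _ hx, hc⟩
      · rintro ⟨x, hx, hc⟩
        rcases List.mem_cons.mp hx with rfl | hx'
        · exact absurd hc h
        · exact ⟨x, hx', hc⟩

lemma str_count_gram (s : String) (k : Nat) (hk : k + 30 ≤ s.toList.length) :
    PySem.Str.count s (PySem.Str.slice s (some (k : Int)) (some ((k : Int) + 30)))
      = cnt (gram s.toList k) s.toList := by
  rw [PySem.Str.count_eq, slice_toList]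
  exact count_eq_cnt s.toList (gram s.toList k) (gram_ne_nil s.toList k hk)

-- A's flag, as an existential over Nat start indices
lemma flagA_iff (s : String) (h60 : 60 ≤ s.toList.length) :
    innerScanA s (PySem.List.pyRange 0 (PySem.Str.len s - 30)) = true ↔
      ∃ k < s.toList.length - 30, 3 ≤ cnt (gram s.toList k) s.toList := by
  have hcast : PySem.Str.len s - 30 = ((s.toList.length - 30 : Nat) : Int) := by
    rw [PySem.Str.len_eq]; omega
  rw [innerScanA_iff, hcast, PySem.List.pyRange_zero_natCast]
  constructor
  · rintro ⟨i, hi, hcnt⟩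
    obtain ⟨k, hk, rfl⟩ := List.mem_map.mp hi
    have hk' := List.mem_range.mp hk
    exact ⟨k, hk', by rwa [str_count_gram s k (by omega)] at hcnt⟩
  · rintro ⟨k, hk, hcnt⟩
    exact ⟨(k : Int), List.mem_map.mpr ⟨k, List.mem_range.mpr hk, rfl⟩,
      by rwa [str_count_gram s k (by omega)]⟩

-- cast bridge for the greedy loop at the start state
lemma repScan_three (ps : List Nat) :
    3 ≤ repScan (ps.map (fun (k : Nat) => (k : Int))) 0 0 ↔ 3 ≤ natScan ps 0 0 := by
  have h : repScan (ps.map (fun (k : Nat) => (k : Int))) 0 0 = ((natScan ps 0 0 : Nat) : Int) := by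
    simpa using repScan_map_cast ps 0 0
  rw [h]
  constructor
  · intro hx; exact_mod_cast hx
  · intro hx; exact_mod_cast hx

-- one gram's collected position list is exactly its occurrence list
lemma filter_eq_occs (s : String) (g : String) (k₀ : Nat) (h60 : 60 ≤ s.toList.length)
    (hk₀ : k₀ < s.toList.length - 29)
    (hg : g = PySem.Str.slice s (some (k₀ : Int)) (some ((k₀ : Int) + 30))) :
    (List.range (s.toList.length - 29)).filter
        (fun (k : Nat) => PySem.Str.slice s (some (k : Int)) (some ((k : Int) + 30)) == g)
      = occs s.toList g.toList 0 := by
  have hglen : g.toList.length = 30 := by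
    rw [hg, slice_toList]
    exact gram_len s.toList k₀ (by omega)
  have hocc0 : occs s.toList g.toList 0
      = (List.range' 0 s.toList.length).filter (fun i => g.toList.isPrefixOf (s.toList.drop i)) := by
    have := occs_eq_filter s.toList g.toList s.toList.length 0 (by omega)
    simpa using this
  have hsplit : List.range' 0 s.toList.length
      = List.range' 0 (s.toList.length - 29) ++ List.range' (s.toList.length - 29) 29 := by
    have h := List.range'_append (s := 0) (m := s.toList.length - 29) (n := 29) (step := 1)
    simp only [Nat.zero_add, Nat.one_mul] at h
    rw [h, show s.toList.length - 29 + 29 = s.toList.length from by omega]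
  have htail : (List.range' (s.toList.length - 29) 29).filter
      (fun i => g.toList.isPrefixOf (s.toList.drop i)) = [] := by
    rw [List.filter_eq_nil_iff]
    intro a ha hpa
    have hbound := List.mem_range'_1.mp ha
    have hle := (List.isPrefixOf_iff_prefix.mp hpa).length_le
    rw [hglen, List.length_drop] at hle
    omega
  rw [hocc0, hsplit, List.filter_append, htail, List.append_nil, ← List.range_eq_range']
  apply List.filter_congr
  intro k hk
  have hk' : k < s.toList.length - 29 := List.mem_range.mp hk
  have hiff : PySem.Str.slice s (some (k : Int)) (some ((k : Int) + 30)) = g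
      ↔ g.toList.IsPrefix (s.toList.drop k) := by
    rw [← String.toList_inj, slice_toList]
    rw [List.prefix_iff_eq_take, hglen]
    unfold gram
    exact ⟨fun h => h.symm, fun h => h.symm⟩
  by_cases hx : g.toList.IsPrefix (s.toList.drop k)
  · have h1 : (PySem.Str.slice s (some (k : Int)) (some ((k : Int) + 30)) == g) = true := by
      rw [beq_iff_eq]
      exact hiff.mpr hx
    have h2 : g.toList.isPrefixOf (s.toList.drop k) = true := List.isPrefixOf_iff_prefix.mpr hx
    rw [h1, h2]
  · have h1 : (PySem.Str.slice s (some (k : Int)) (some ((k : Int) + 30)) == g) = false := by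
      rw [beq_eq_false_iff_ne]
      exact fun hc => hx (hiff.mp hc)
    have h2 : g.toList.isPrefixOf (s.toList.drop k) = false := by
      cases hb : g.toList.isPrefixOf (s.toList.drop k)
      · rfl
      · exact absurd (List.isPrefixOf_iff_prefix.mp hb) hx
    rw [h1, h2]

lemma flagB_iff (s : String) (h60 : 60 ≤ s.toList.length) :
    hasTripleRepeat s = true ↔
      ∃ k < s.toList.length - 29, 3 ≤ cnt (gram s.toList k) s.toList := by
  have hcast : PySem.Str.len s - 29 = ((s.toList.length - 29 : Nat) : Int) := by
    rw [PySem.Str.len_eq]; omega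
  have hnodup : ∀ l : List (String × Int),
      (List.foldl (fun d p => d.modify p.1 [] (fun x => x ++ [p.2]))
        (PySem.Dict.empty : PySem.Dict String (List Int)) l).keys.Nodup := fun l =>
    PySem.Dict.nodup_keys_foldl_modify_key l Prod.fst []
      (fun _ x => fun xs => xs ++ [x.2]) PySem.Dict.empty List.nodup_nil
  have hkeysl : ∀ l : List (String × Int),
      (List.foldl (fun d p => d.modify p.1 [] (fun x => x ++ [p.2]))
        (PySem.Dict.empty : PySem.Dict String (List Int)) l).keys
      = PySem.Set.ofList (l.map Prod.fst) := by
    intro l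
    rw [PySem.Dict.keys_foldl_modify_key l Prod.fst []
      (fun _ x => fun xs => xs ++ [x.2]) PySem.Dict.empty]
    rfl
  have hgetD : ∀ (l : List (String × Int)) (g : String),
      (List.foldl (fun d p => d.modify p.1 [] (fun x => x ++ [p.2]))
        (PySem.Dict.empty : PySem.Dict String (List Int)) l).getD g []
      = (l.filter (fun p => p.1 == g)).map (fun p => p.2) := by
    intro l g
    have h := PySem.Dict.getD_foldl_modify_append l
      (PySem.Dict.empty : PySem.Dict String (List Int)) g
    rw [h, show (PySem.Dict.empty : PySem.Dict String (List Int)).getD g [] = [] from rfl,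
      List.nil_append]
  have hval : ∀ k₀, k₀ < s.toList.length - 29 →
      ((3 ≤ repScan (((List.range (s.toList.length - 29)).filter
          (fun (k : Nat) => PySem.Str.slice s (some (k : Int)) (some ((k : Int) + 30))
            == PySem.Str.slice s (some (k₀ : Int)) (some ((k₀ : Int) + 30)))).map
          (fun (k : Nat) => (k : Int))) 0 0)
        ↔ 3 ≤ cnt (gram s.toList k₀) s.toList) := by
    intro k₀ hk₀
    have hgl : (PySem.Str.slice s (some (k₀ : Int)) (some ((k₀ : Int) + 30))).toList
        = gram s.toList k₀ := slice_toList s k₀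
    have hglen : (PySem.Str.slice s (some (k₀ : Int)) (some ((k₀ : Int) + 30))).toList.length = 30 := by
      rw [hgl]
      exact gram_len s.toList k₀ (by omega)
    rw [filter_eq_occs s _ k₀ h60 hk₀ rfl]
    have h2 : natScan (occs s.toList
        (PySem.Str.slice s (some (k₀ : Int)) (some ((k₀ : Int) + 30))).toList 0) 0 0
        = cnt (PySem.Str.slice s (some (k₀ : Int)) (some ((k₀ : Int) + 30))).toList s.toList := by
      have h3 := natScan_occs s.toList _ hglen s.toList.length 0 0 0 (by omega) le_rfl
      simpa using h3
    have h1 : (3 ≤ repScan ((occs s.toList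
          (PySem.Str.slice s (some (k₀ : Int)) (some ((k₀ : Int) + 30))).toList 0).map
          (fun (k : Nat) => (k : Int))) 0 0)
        ↔ 3 ≤ natScan (occs s.toList
          (PySem.Str.slice s (some (k₀ : Int)) (some ((k₀ : Int) + 30))).toList 0) 0 0 :=
      repScan_three _
    rw [h1, h2, hgl]
  simp only [hasTripleRepeat]
  rw [hcast, PySem.List.pyRange_zero_natCast, List.map_map,
    PySem.Dict.values_eq_map_keys _ (hnodup _) ([] : List Int), List.any_map, List.any_eq_true]
  constructor
  · rintro ⟨g, hgmem, hcond⟩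
    rw [hkeysl, PySem.Set.mem_ofList, List.map_map] at hgmem
    obtain ⟨k₀, hk₀r, hfeq⟩ := List.mem_map.mp hgmem
    have hk₀ : k₀ < s.toList.length - 29 := List.mem_range.mp hk₀r
    have hgdef : g = PySem.Str.slice s (some (k₀ : Int)) (some ((k₀ : Int) + 30)) := hfeq.symm
    simp only [Function.comp_apply, decide_eq_true_eq] at hcond
    rw [hgetD, List.filter_map, List.map_map] at hcond
    subst hgdef
    exact ⟨k₀, hk₀, (hval k₀ hk₀).mp hcond⟩
  · rintro ⟨k₀, hk₀, hcnt⟩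
    refine ⟨PySem.Str.slice s (some (k₀ : Int)) (some ((k₀ : Int) + 30)), ?_, ?_⟩
    · rw [hkeysl, PySem.Set.mem_ofList, List.map_map]
      exact List.mem_map.mpr ⟨k₀, List.mem_range.mpr hk₀, rfl⟩
    · simp only [Function.comp_apply, decide_eq_true_eq]
      rw [hgetD, List.filter_map, List.map_map]
      exact (hval k₀ hk₀).mpr hcnt

lemma flag_eq (s : String) (h60 : 60 ≤ s.toList.length) :
    innerScanA s (PySem.List.pyRange 0 (PySem.Str.len s - 30)) = hasTripleRepeat s := by
  have hA := flagA_iff s h60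
  have hB := flagB_iff s h60
  cases hcA : innerScanA s (PySem.List.pyRange 0 (PySem.Str.len s - 30)) <;>
    cases hcB : hasTripleRepeat s
  · rfl
  · exfalso
    obtain ⟨k, hk, hcnt⟩ := hB.mp hcB
    have hglen : (gram s.toList k).length = 30 := gram_len s.toList k (by omega)
    have hgne : gram s.toList k ≠ [] := gram_ne_nil s.toList k (by omega)
    obtain ⟨p, q, r, hpp, hqq, hrr, hle1, hle2⟩ := cnt3_ex _ hgne _ hcnt
    rw [hglen] at hle1 hle2
    have hr : r + 30 ≤ s.toList.length := by
      have := hrr.length_le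
      rw [hglen, List.length_drop] at this
      omega
    have hgp : gram s.toList p = gram s.toList k := by
      have h1 := List.prefix_iff_eq_take.mp hpp
      rw [hglen] at h1
      unfold gram
      exact h1.symm
    have hAtrue : innerScanA s (PySem.List.pyRange 0 (PySem.Str.len s - 30)) = true := by
      rw [hA]
      refine ⟨p, by omega, ?_⟩
      rw [hgp]
      exact hcnt
    rw [hcA] at hAtrue
    exact absurd hAtrue (by simp)
  · exfalso
    obtain ⟨k, hk, hcnt⟩ := hA.mp hcA
    have hBtrue : hasTripleRepeat s = true := hB.mpr ⟨k, by omega, hcnt⟩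
    rw [hcB] at hBtrue
    exact absurd hBtrue (by simp)
  · rfl

-- A's field loop appends exactly the filtered-and-mapped messages of B's comprehension
lemma fieldLoopA_flat (sid : String) (shot : List (String × String)) :
    ∀ fields issues, fieldLoopA sid shot fields issues
      = issues ++ (fields.filter (fun f =>
          decide ((60 : Int) ≤ PySem.Str.len (pyDictGetD shot f ""))
            && hasTripleRepeat (pyDictGetD shot f ""))).map
          (fun f => "BLOCKING: " ++ sid ++ " field '" ++ f ++ "' has CORRUPTED repeated text") := by
  intro fields
  induction fields with
  | nil => intro issues; simp [fieldLoopA]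
  | cons field rest ih =>
    intro issues
    rw [fieldLoopA, List.filter_cons]
    by_cases h60 : 60 ≤ (pyDictGetD shot field "").toList.length
    · have hne : (pyDictGetD shot field "" == "") = false := by
        rw [beq_eq_false_iff_ne]
        intro h
        rw [h] at h60
        simp at h60
      have hcond : (pyDictGetD shot field "" == ""
          || decide (PySem.Str.len (pyDictGetD shot field "") < 60)) = false := by
        rw [hne, Bool.false_or, decide_eq_false_iff_not, not_lt, PySem.Str.len_eq]
        exact_mod_cast h60
      have h60' : decide ((60 : Int) ≤ PySem.Str.len (pyDictGetD shot field "")) = true := by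
        rw [decide_eq_true_eq, PySem.Str.len_eq]
        exact_mod_cast h60
      rw [if_neg (by rw [hcond]; simp), flag_eq _ h60]
      by_cases hf : hasTripleRepeat (pyDictGetD shot field "") = true
      · rw [if_pos hf, ih, if_pos (by rw [h60', hf]; rfl), List.map_cons]
        simp
      · rw [if_neg hf, ih,
          if_neg (by rw [h60', Bool.eq_false_iff.mpr hf]; simp)]
    · have hcond : (pyDictGetD shot field "" == ""
          || decide (PySem.Str.len (pyDictGetD shot field "") < 60)) = true := by
        rw [Bool.or_eq_true, decide_eq_true_eq]
        right
        rw [PySem.Str.len_eq]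
        exact_mod_cast by omega
      have h60' : decide ((60 : Int) ≤ PySem.Str.len (pyDictGetD shot field "")) = false := by
        rw [decide_eq_false_iff_not, PySem.Str.len_eq]
        intro hc
        exact h60 (by exact_mod_cast hc)
      rw [if_pos hcond, ih, if_neg (by rw [h60']; simp)]

-- A's shot accumulator loop flattens to B's flatMap
lemma shotLoopA_flat : ∀ shots issues, shotLoopA shots issues = issues ++ shots.flatMap issuesOf := by
  intro shots
  induction shots with
  | nil => intro issues; simp [shotLoopA]
  | cons shot rest ih =>
    intro issues
    rw [shotLoopA, fieldLoopA_flat, ih, List.flatMap_cons, List.append_assoc]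
    rfl

-- ===== VERDICT (by name: the statement is the Claim_ definition above) =====
theorem check_prompt_health_py_spec : Claim_equal_check_prompt_health_py := by
  intro shots _
  unfold Spec_check_prompt_health_py check_prompt_health_py check_prompt_health_py_alt
  rw [shotLoopA_flat]
  rfl
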